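-- pv_equiv track=rewrite | github.com/Matej-Jukic/projektPep8 | PEP8/FileParser/pythonFeatureHandler.py | removeSpacesRightAndLeftFromBrackets
-- ===== SOURCE A (Python) =====
-- def removeSpacesRightAndLeftFromBrackets(lines):
--
--
--     count = 0
--     for line in lines:
--
--         while "( " in line:
--             line = line[:line.index("( ")+1] + line[line.index("( ")+2:]
--         while "[ " in line:
--             line = line[:line.index("[ ")+1] + line[line.index("[ ")+2:]
--         while "{ " in line:
--             line = line[:line.index("{ ")+1] + line[line.index("{ ")+2:]
--         while " )" in line:
--             line = line[:line.index(" )")] + line[line.index(" )")+1:]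
--         while " ]" in line:
--             line = line[:line.index(" ]")] + line[line.index(" ]")+1:]
--         while " }" in line:
--             line = line[:line.index(" }")] + line[line.index(" }")+1:]
--
--         lines[count] = line
--         count += 1
--
--     return lines
-- ===== SOURCE B (Python) =====
-- def removeSpacesRightAndLeftFromBrackets(lines):
--     for i, line in enumerate(lines):
--         out = []
--         for ch in line:
--             if ch == ' ' and out and out[-1] in '([{':
--                 continue
--             if ch in ')]}':
--                 while out and out[-1] == ' ':
--                     out.pop()
--             out.append(ch)
--         lines[i] = ''.join(out)
--     return lines
-- ===== Notes on version B (the rewrite author's own statement) =====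
-- stated objective: alternative
-- what changed: Replaces six repeated find-and-delete while-loops per line (each rescanning the line from the start after deleting a single space) by one forward pass per line that builds the output on a stack: spaces right after an opening bracket are skipped, and a closing bracket pops the pending spaces before it.
import Mathlib
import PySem

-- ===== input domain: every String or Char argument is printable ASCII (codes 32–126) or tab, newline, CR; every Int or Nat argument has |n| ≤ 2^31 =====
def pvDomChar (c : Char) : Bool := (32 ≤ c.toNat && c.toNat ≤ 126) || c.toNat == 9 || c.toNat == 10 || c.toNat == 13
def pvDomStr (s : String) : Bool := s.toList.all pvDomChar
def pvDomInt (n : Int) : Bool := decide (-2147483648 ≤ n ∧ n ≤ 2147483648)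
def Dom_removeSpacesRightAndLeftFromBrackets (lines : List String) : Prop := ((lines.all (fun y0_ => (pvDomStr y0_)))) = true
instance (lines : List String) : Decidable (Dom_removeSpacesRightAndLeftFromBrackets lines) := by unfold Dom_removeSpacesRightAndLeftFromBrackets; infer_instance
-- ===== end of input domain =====

-- B replaces A's six repeated find-and-delete while loops per line by one forward stack pass per line
-- (same return value; like A, the Python B also reassigns lines[i] in place — the mutation is identical).

-- ===== PORT A =====
-- Python's 2-char substring test/index (`"( " in line`, `line.index("( ")`): first index i with
-- l[i]=x, l[i+1]=y, none if absent — exact, ported by hand on List Char.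
def find2 (x y : Char) : List Char → Option Nat
  | [] => none
  | [_] => none
  | a :: b :: t => if a = x ∧ b = y then some 0 else (find2 x y (b :: t)).map (· + 1)

theorem find2_le {x y : Char} : ∀ {l : List Char} {i : Nat}, find2 x y l = some i → i + 2 ≤ l.length := by
  intro l
  induction l with
  | nil => intro i h; simp [find2] at h
  | cons a t ih =>
    intro i h
    match t with
    | [] => simp [find2] at h
    | b :: t' =>
      simp only [find2] at h
      split at h
      · simp at h; simp [List.length_cons]; omega
      · simp only [Option.map_eq_some_iff] at h
        obtain ⟨j, hj, hij⟩ := h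
        have := ih hj
        simp at this ⊢
        omega

-- while "c " in line: line = line[:i+1] + line[i+2:]   (slices with nonneg in-range bounds = take/drop, exact)
def loopOpen (c : Char) (l : List Char) : List Char :=
  match h : find2 c ' ' l with
  | none => l
  | some i => loopOpen c (l.take (i+1) ++ l.drop (i+2))
termination_by l.length
decreasing_by
  have := find2_le h
  simp only [List.length_append, List.length_take, List.length_drop]
  omega

-- while " c" in line: line = line[:i] + line[i+1:]
def loopClose (c : Char) (l : List Char) : List Char :=
  match h : find2 ' ' c l with
  | none => l
  | some i => loopClose c (l.take i ++ l.drop (i+1))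
termination_by l.length
decreasing_by
  have := find2_le h
  simp only [List.length_append, List.length_take, List.length_drop]
  omega

-- the body of A's for-loop: the six while loops in A's order: "( ", "[ ", "{ ", " )", " ]", " }"
def perLineA (s : String) : String :=
  String.mk (loopClose '}' (loopClose ']' (loopClose ')'
    (loopOpen '{' (loopOpen '[' (loopOpen '(' s.toList))))))

-- for line in lines: … lines[count] = line; count += 1; return lines  (index-by-index reassignment = map)
def removeSpacesRightAndLeftFromBrackets (lines : List String) : List String :=
  lines.map perLineA

-- ===== PORT B =====
def isOpenB (c : Char) : Bool := c == '(' || c == '[' || c == '{'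
def isCloseB (c : Char) : Bool := c == ')' || c == ']' || c == '}'

-- `out and out[-1] in '([{'`: the last emitted char exists and is an opening bracket
def openHead (acc : List Char) : Bool := match acc.head? with | some a => isOpenB a | none => false

-- one step of B's per-character loop; acc is the output list `out` in reverse (append = cons, pop = tail)
def bstep (acc : List Char) (ch : Char) : List Char :=
  if ch == ' ' && openHead acc then acc
  else if isCloseB ch then ch :: acc.dropWhile (· == ' ')
  else ch :: acc

def perLineB (s : String) : String :=
  String.mk (s.toList.foldl bstep []).reverse

def removeSpacesRightAndLeftFromBrackets_alt (lines : List String) : List String :=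
  lines.map perLineB

-- ===== PRECONDITION & SPEC =====
def Spec_removeSpacesRightAndLeftFromBrackets (lines : List String) (out : List String) : Prop := out = removeSpacesRightAndLeftFromBrackets_alt lines
instance (lines : List String) (out : List String) : Decidable (Spec_removeSpacesRightAndLeftFromBrackets lines out) := by unfold Spec_removeSpacesRightAndLeftFromBrackets; infer_instance

-- ===== CLAIM (what is proved, stated in full; the proofs are below) =====
def Claim_equal_removeSpacesRightAndLeftFromBrackets : Prop := ∀ (lines : List String), Dom_removeSpacesRightAndLeftFromBrackets lines → Spec_removeSpacesRightAndLeftFromBrackets lines (removeSpacesRightAndLeftFromBrackets lines)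

-- ===== LEMMAS AND PROOFS =====

-- single left-to-right pass dropping spaces while d is set (d = "an opening trigger p was just emitted")
def goOpen (p : Char → Bool) (d : Bool) : List Char → List Char
  | [] => []
  | a :: t => if a == ' ' && d then goOpen p d t else a :: goOpen p (p a) t

-- first non-space character ahead
def lk (t : List Char) : Option Char := (t.dropWhile (· == ' ')).head?
def laP (p : Char → Bool) (t : List Char) : Bool := match lk t with | some b => p b | none => false

-- single pass dropping each space whose next non-space character is a closing trigger p
def goClose (p : Char → Bool) : List Char → List Char
  | [] => []
  | a :: t => if a == ' ' && laP p t then goClose p t else a :: goClose p t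

-- both at once: the reference single pass
def combined (d : Bool) : List Char → List Char
  | [] => []
  | a :: t => if a == ' ' && (d || laP isCloseB t) then combined d t else a :: combined (isOpenB a) t

theorem lk_cons (a : Char) (t : List Char) : lk (a :: t) = if a == ' ' then lk t else some a := by
  simp only [lk, List.dropWhile_cons]
  split <;> simp_all

theorem laP_cons (p : Char → Bool) (a : Char) (t : List Char) :
    laP p (a :: t) = if a == ' ' then laP p t else p a := by
  unfold laP
  rw [lk_cons]
  by_cases ha : (a == ' ') = true
  · rw [if_pos ha, if_pos ha]
  · rw [if_neg ha, if_neg ha]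

theorem find2_none_cons {x y a : Char} {t : List Char} (h : find2 x y (a :: t) = none) :
    find2 x y t = none := by
  cases t with
  | nil => rfl
  | cons b t' =>
    simp only [find2] at h
    split at h
    · simp at h
    · simpa using h

theorem find2_run {c : Char} : ∀ (S z : List Char), S ≠ [] → (∀ a ∈ S, a = ' ') →
    find2 ' ' c (S ++ c :: z) ≠ none := by
  intro S
  induction S with
  | nil => intro z h; simp at h
  | cons s S' ih =>
    intro z _ hsp
    have hs : s = ' ' := hsp s (by simp)
    cases S' with
    | nil => simp [find2, hs]
    | cons s2 S'' =>
      have hs2 : s2 = ' ' := hsp s2 (by simp)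
      simp only [List.cons_append, find2]
      split
      · simp
      · have h2 := ih z (by simp) (fun a ha => hsp a (by simp [ha]))
        simp only [List.cons_append] at h2
        intro hmap
        exact h2 (by simpa using hmap)

theorem find2_decomp {x y : Char} : ∀ {l : List Char} {i : Nat}, find2 x y l = some i →
    ∃ u v, l = u ++ x :: y :: v ∧ u.length = i ∧ find2 x y u = none := by
  intro l
  induction l with
  | nil => intro i h; simp [find2] at h
  | cons a t ih =>
    intro i h
    match t with
    | [] => simp [find2] at h
    | b :: t' =>
      simp only [find2] at h
      split at h
      · rename_i hxy
        obtain ⟨hx, hy⟩ := hxy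
        obtain rfl : i = 0 := by simpa using h.symm
        exact ⟨[], t', by simp [hx, hy], rfl, rfl⟩
      · rename_i hxy
        simp only [Option.map_eq_some_iff] at h
        obtain ⟨j, hj, hji⟩ := h
        obtain ⟨u, v, he, hlen, hnone⟩ := ih hj
        refine ⟨a :: u, v, by simp [he], by simp [hlen, ← hji], ?_⟩
        cases u with
        | nil => rfl
        | cons u0 u' =>
          have hb : u0 = b := by
            have := congrArg List.head? he
            exact (by simpa using this : b = u0).symm
          simp only [find2]
          split
          · rename_i hc; exact absurd ⟨hc.1, hb ▸ hc.2⟩ hxy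
          · simp [hnone]

theorem goOpen_id {c : Char} : ∀ {l : List Char} {d : Bool}, find2 c ' ' l = none →
    (d = true → l.head? ≠ some ' ') → goOpen (· == c) d l = l := by
  intro l
  induction l with
  | nil => intro d _ _; rfl
  | cons a t ih =>
    intro d h hd
    have ht : find2 c ' ' t = none := find2_none_cons h
    have hnext : ((a == c) = true) → t.head? ≠ some ' ' := by
      intro hac hh
      cases t with
      | nil => simp at hh
      | cons b t' =>
        have hb : b = ' ' := by simpa using hh
        have hac' : a = c := by simpa using hac
        simp [find2, hac', hb] at h
    have hcond : (a == ' ' && d) = false := by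
      by_cases ha : a = ' '
      · cases d with
        | true => exact absurd (by simp [ha]) (hd rfl)
        | false => simp
      · simp [ha]
    simp only [goOpen, hcond]
    rw [if_neg (by simp), ih ht hnext]

theorem goOpen_erase {p : Char → Bool} {c : Char} (hp : p c = true) (hc : c ≠ ' ') :
    ∀ (u : List Char) (v : List Char) (d : Bool),
    goOpen p d (u ++ c :: ' ' :: v) = goOpen p d (u ++ c :: v) := by
  intro u
  induction u with
  | nil =>
    intro v d
    simp [goOpen, hp, hc]
  | cons a u' ih =>
    intro v d
    simp only [List.cons_append, goOpen]
    by_cases hcond : (a == ' ' && d) = true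
    · rw [if_pos hcond, if_pos hcond, ih]
    · rw [if_neg hcond, if_neg hcond, ih]

theorem loopOpen_eq_aux {c : Char} (hc : c ≠ ' ') :
    ∀ (n : Nat) (l : List Char), l.length ≤ n → loopOpen c l = goOpen (· == c) false l := by
  intro n
  induction n with
  | zero =>
    intro l hl
    have : l = [] := by cases l <;> simp_all
    subst this
    rw [loopOpen.eq_def]
    simp [find2, goOpen]
  | succ n ih =>
    intro l hl
    rw [loopOpen.eq_def]
    split
    · rename_i h
      exact (goOpen_id h (by simp)).symm
    · rename_i i h
      obtain ⟨u, v, rfl, hlen, _⟩ := find2_decomp h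
      have htake : (u ++ c :: ' ' :: v).take (i + 1) = u ++ [c] := by
        rw [show u ++ c :: ' ' :: v = (u ++ [c]) ++ ' ' :: v by simp]
        rw [List.take_left' (by simp [hlen])]
      have hdrop : (u ++ c :: ' ' :: v).drop (i + 2) = v := by
        rw [show u ++ c :: ' ' :: v = (u ++ [c, ' ']) ++ v by simp]
        rw [List.drop_left' (by simp [hlen])]
      rw [htake, hdrop]
      have hlen2 : (u ++ [c] ++ v).length ≤ n := by
        simp only [List.length_append, List.length_cons, List.length_nil] at hl ⊢
        omega
      rw [ih _ hlen2, show u ++ [c] ++ v = u ++ c :: v by simp]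
      exact (goOpen_erase (by simp) hc u v false).symm

theorem loopOpen_eq {c : Char} (hc : c ≠ ' ') (l : List Char) :
    loopOpen c l = goOpen (· == c) false l :=
  loopOpen_eq_aux hc l.length l le_rfl

theorem laP_true_decomp {p : Char → Bool} {t : List Char} (h : laP p t = true) :
    ∃ b z, t = t.takeWhile (· == ' ') ++ b :: z ∧ p b = true ∧ (∀ a ∈ t.takeWhile (· == ' '), a = ' ') := by
  unfold laP lk at h
  cases hd : t.dropWhile (· == ' ') with
  | nil => rw [hd] at h; simp at h
  | cons b z =>
    rw [hd] at h
    simp only [List.head?_cons] at h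
    refine ⟨b, z, ?_, h, ?_⟩
    · conv_lhs => rw [← List.takeWhile_append_dropWhile (p := (· == ' ')) (l := t)]
      rw [hd]
    · intro a ha
      have := List.mem_takeWhile_imp ha
      simpa using this

theorem goClose_id {c : Char} : ∀ {l : List Char}, find2 ' ' c l = none → goClose (· == c) l = l := by
  intro l
  induction l with
  | nil => intro _; rfl
  | cons a t ih =>
    intro h
    have ht : find2 ' ' c t = none := find2_none_cons h
    simp only [goClose]
    by_cases hcond : (a == ' ' && laP (· == c) t) = true
    · exfalso
      obtain ⟨ha, hla⟩ := by simpa using hcond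
      obtain ⟨b, z, hdec, hpb, hsp⟩ := laP_true_decomp hla
      have hbc : b = c := by simpa using hpb
      subst hbc
      have : find2 ' ' b ((a :: t.takeWhile (· == ' ')) ++ b :: z) ≠ none :=
        find2_run _ z (by simp) (by
          intro x hx
          rcases List.mem_cons.mp hx with rfl | hx2
          · exact ha
          · exact hsp x hx2)
      exact this (by rw [List.cons_append, ← hdec]; exact h)
    · rw [if_neg hcond, ih ht]

theorem goClose_erase {c : Char} (hc : c ≠ ' ') :
    ∀ (u v : List Char), find2 ' ' c u = none →
    goClose (· == c) (u ++ ' ' :: c :: v) = goClose (· == c) (u ++ c :: v) := by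
  intro u
  induction u with
  | nil =>
    intro v _
    have hcondn : (' ' == ' ' && laP (· == c) (c :: v)) = true := by
      unfold laP lk
      simp [hc]
    simp only [List.nil_append, goClose, hcondn]
    simp
  | cons a u' ih =>
    intro v h
    have hu' : find2 ' ' c u' = none := find2_none_cons h
    simp only [List.cons_append, goClose]
    by_cases ha : a = ' '
    · cases hd : u'.dropWhile (· == ' ') with
      | nil =>
        have hLa : laP (· == c) (u' ++ ' ' :: c :: v) = true := by
          unfold laP lk
          rw [List.dropWhile_append, hd]
          simp [hc]
        have hRa : laP (· == c) (u' ++ c :: v) = true := by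
          unfold laP lk
          rw [List.dropWhile_append, hd]
          simp [hc]
        rw [if_pos (by simp [ha, hLa]), if_pos (by simp [ha, hRa]), ih v hu']
      | cons b r =>
        have hbne : b ≠ ' ' := by
          have := List.head?_dropWhile_not (p := (· == ' ')) u'
          rw [hd] at this
          simpa using this
        have hbc : b ≠ c := by
          intro hbc
          subst hbc
          have hdec : a :: u' = (a :: u'.takeWhile (· == ' ')) ++ b :: r := by
            conv_lhs => rw [show a :: u' = a :: (u'.takeWhile (· == ' ') ++ u'.dropWhile (· == ' ')) by rw [List.takeWhile_append_dropWhile]]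
            rw [hd, List.cons_append]
          have : find2 ' ' b ((a :: u'.takeWhile (· == ' ')) ++ b :: r) ≠ none := by
            apply find2_run _ r (by simp)
            intro x hx
            rcases List.mem_cons.mp hx with rfl | hx2
            · exact ha
            · have := List.mem_takeWhile_imp hx2; simpa using this
          rw [← hdec] at this
          exact this h
        have hLa : laP (· == c) (u' ++ ' ' :: c :: v) = false := by
          unfold laP lk
          rw [List.dropWhile_append, hd]
          simp [hbc]
        have hRa : laP (· == c) (u' ++ c :: v) = false := by
          unfold laP lk
          rw [List.dropWhile_append, hd]
          simp [hbc]
        rw [if_neg (by simp [hLa]), if_neg (by simp [hRa]), ih v hu']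
    · rw [if_neg (by simp [ha]), if_neg (by simp [ha]), ih v hu']

theorem loopClose_eq_aux {c : Char} (hc : c ≠ ' ') :
    ∀ (n : Nat) (l : List Char), l.length ≤ n → loopClose c l = goClose (· == c) l := by
  intro n
  induction n with
  | zero =>
    intro l hl
    have : l = [] := by cases l <;> simp_all
    subst this
    rw [loopClose.eq_def]
    simp [find2, goClose]
  | succ n ih =>
    intro l hl
    rw [loopClose.eq_def]
    split
    · rename_i h
      exact (goClose_id h).symm
    · rename_i i h
      obtain ⟨u, v, rfl, hlen, hnone⟩ := find2_decomp h
      have htake : (u ++ ' ' :: c :: v).take i = u := by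
        rw [show u ++ ' ' :: c :: v = u ++ (' ' :: c :: v) by rfl]
        rw [List.take_left' hlen]
      have hdrop : (u ++ ' ' :: c :: v).drop (i + 1) = c :: v := by
        rw [show u ++ ' ' :: c :: v = (u ++ [' ']) ++ c :: v by simp]
        rw [List.drop_left' (by simp [hlen])]
      rw [htake, hdrop]
      have hlen2 : (u ++ c :: v).length ≤ n := by
        simp only [List.length_append, List.length_cons] at hl ⊢
        omega
      rw [ih _ hlen2]
      exact (goClose_erase hc u v hnone).symm

theorem loopClose_eq {c : Char} (hc : c ≠ ' ') (l : List Char) :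
    loopClose c l = goClose (· == c) l :=
  loopClose_eq_aux hc l.length l le_rfl

theorem goOpen_merge {p q : Char → Bool} (hp : p ' ' = false) (hq : q ' ' = false) :
    ∀ (l : List Char) (dp dq : Bool),
    goOpen p dp (goOpen q dq l) = goOpen (fun a => p a || q a) (dp || dq) l := by
  intro l
  induction l with
  | nil => intro dp dq; rfl
  | cons a t ih =>
    intro dp dq
    by_cases ha : a = ' '
    · subst ha
      cases dq with
      | true =>
        rw [show goOpen q true (' ' :: t) = goOpen q true t by rw [goOpen, if_pos (by simp)]]
        rw [show goOpen (fun a => p a || q a) (dp || true) (' ' :: t)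
            = goOpen (fun a => p a || q a) (dp || true) t by rw [goOpen, if_pos (by simp)]]
        exact ih dp true
      | false =>
        rw [show goOpen q false (' ' :: t) = ' ' :: goOpen q (q ' ') t by
              rw [goOpen, if_neg (by simp)], hq]
        cases dp with
        | true =>
          rw [show goOpen p true (' ' :: goOpen q false t) = goOpen p true (goOpen q false t) by
                rw [goOpen, if_pos (by simp)]]
          rw [show goOpen (fun a => p a || q a) (true || false) (' ' :: t)
              = goOpen (fun a => p a || q a) (true || false) t by rw [goOpen, if_pos (by simp)]]
          exact ih true false
        | false =>
          rw [show goOpen p false (' ' :: goOpen q false t)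
              = ' ' :: goOpen p (p ' ') (goOpen q false t) by rw [goOpen, if_neg (by simp)], hp]
          rw [show goOpen (fun a => p a || q a) (false || false) (' ' :: t)
              = ' ' :: goOpen (fun a => p a || q a) (p ' ' || q ' ') t by
                rw [goOpen, if_neg (by simp)]]
          rw [hp, hq]
          exact congrArg _ (ih false false)
    · have ha' : (a == ' ') = false := by simpa using ha
      rw [show goOpen q dq (a :: t) = a :: goOpen q (q a) t by rw [goOpen, if_neg (by simp [ha'])]]
      rw [show goOpen p dp (a :: goOpen q (q a) t) = a :: goOpen p (p a) (goOpen q (q a) t) by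
            rw [goOpen, if_neg (by simp [ha'])]]
      rw [show goOpen (fun a => p a || q a) (dp || dq) (a :: t)
          = a :: goOpen (fun a => p a || q a) (p a || q a) t by rw [goOpen, if_neg (by simp [ha'])]]
      exact congrArg _ (ih (p a) (q a))

theorem lk_goOpen (q : Char → Bool) : ∀ (t : List Char) (d : Bool), lk (goOpen q d t) = lk t := by
  intro t
  induction t with
  | nil => intro d; rfl
  | cons a t ih =>
    intro d
    by_cases hcond : (a == ' ' && d) = true
    · have ha : (a == ' ') = true := (Bool.and_eq_true_iff.mp hcond).1
      rw [goOpen, if_pos hcond, ih d, lk_cons, if_pos ha]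
    · rw [goOpen, if_neg hcond, lk_cons, lk_cons]
      by_cases ha : (a == ' ') = true
      · rw [if_pos ha, if_pos ha, ih]
      · rw [if_neg ha, if_neg ha]

theorem lk_goClose (q : Char → Bool) : ∀ (t : List Char), lk (goClose q t) = lk t := by
  intro t
  induction t with
  | nil => rfl
  | cons a t ih =>
    by_cases hcond : (a == ' ' && laP q t) = true
    · have ha : (a == ' ') = true := (Bool.and_eq_true_iff.mp hcond).1
      rw [goClose, if_pos hcond, ih, lk_cons, if_pos ha]
    · rw [goClose, if_neg hcond, lk_cons, lk_cons]
      by_cases ha : (a == ' ') = true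
      · rw [if_pos ha, if_pos ha, ih]
      · rw [if_neg ha, if_neg ha]

theorem laP_goOpen (p q : Char → Bool) (t : List Char) (d : Bool) :
    laP p (goOpen q d t) = laP p t := by
  unfold laP
  rw [lk_goOpen]

theorem laP_goClose (p q : Char → Bool) (t : List Char) :
    laP p (goClose q t) = laP p t := by
  unfold laP
  rw [lk_goClose]

theorem laP_or (p q : Char → Bool) (t : List Char) :
    laP (fun a => p a || q a) t = (laP p t || laP q t) := by
  unfold laP
  cases lk t <;> rfl

theorem goClose_merge (p q : Char → Bool) :
    ∀ (l : List Char), goClose p (goClose q l) = goClose (fun a => p a || q a) l := by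
  intro l
  induction l with
  | nil => rfl
  | cons a t ih =>
    by_cases ha : (a == ' ') = true
    · cases hqa : laP q t with
      | true =>
        rw [show goClose q (a :: t) = goClose q t by rw [goClose, if_pos (by simp [ha, hqa])],
          ih, goClose, if_pos (by simp [ha, laP_or, hqa])]
      | false =>
        rw [show goClose q (a :: t) = a :: goClose q t by rw [goClose, if_neg (by simp [hqa])]]
        rw [show goClose p (a :: goClose q t)
            = if (a == ' ' && laP p (goClose q t)) = true then goClose p (goClose q t)
              else a :: goClose p (goClose q t) by rw [goClose]]
        rw [laP_goClose]
        cases hpa : laP p t with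
        | true =>
          rw [if_pos (by simp [ha, hpa]), ih, goClose, if_pos (by simp [ha, laP_or, hpa])]
        | false =>
          rw [if_neg (by simp [hpa]), ih, goClose, if_neg (by simp [laP_or, hpa, hqa])]
    · rw [show goClose q (a :: t) = a :: goClose q t by rw [goClose, if_neg (by simp [ha])]]
      rw [show goClose p (a :: goClose q t) = a :: goClose p (goClose q t) by
            rw [goClose, if_neg (by simp [ha])]]
      rw [goClose, if_neg (by simp [ha]), ih]

theorem isOpenB_space : isOpenB ' ' = false := by decide
theorem isCloseB_space : isCloseB ' ' = false := by decide

theorem bridge : ∀ (l : List Char) (d : Bool),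
    goClose isCloseB (goOpen isOpenB d l) = combined d l := by
  intro l
  induction l with
  | nil => intro d; rfl
  | cons a t ih =>
    intro d
    by_cases ha : a = ' '
    · subst ha
      cases d with
      | true =>
        rw [show goOpen isOpenB true (' ' :: t) = goOpen isOpenB true t by
              rw [goOpen, if_pos (by simp)], combined, if_pos (by simp), ih]
      | false =>
        rw [show goOpen isOpenB false (' ' :: t) = ' ' :: goOpen isOpenB (isOpenB ' ') t by
              rw [goOpen, if_neg (by simp)], isOpenB_space]
        rw [show goClose isCloseB (' ' :: goOpen isOpenB false t)
            = if (' ' == ' ' && laP isCloseB (goOpen isOpenB false t)) = true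
              then goClose isCloseB (goOpen isOpenB false t)
              else ' ' :: goClose isCloseB (goOpen isOpenB false t) by rw [goClose]]
        rw [laP_goOpen]
        cases hla : laP isCloseB t with
        | true =>
          rw [if_pos (by simp [hla]), ih, combined, if_pos (by simp [hla])]
        | false =>
          rw [if_neg (by simp [hla]), ih, combined, if_neg (by simp [hla]), isOpenB_space]
    · have ha' : (a == ' ') = false := by simpa using ha
      rw [show goOpen isOpenB d (a :: t) = a :: goOpen isOpenB (isOpenB a) t by
            rw [goOpen, if_neg (by simp [ha'])]]
      rw [show goClose isCloseB (a :: goOpen isOpenB (isOpenB a) t)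
          = a :: goClose isCloseB (goOpen isOpenB (isOpenB a) t) by
            rw [goClose, if_neg (by simp [ha'])], ih, combined, if_neg (by simp [ha'])]

theorem foldB : ∀ (l acc : List Char),
    (List.foldl bstep acc l).reverse =
      (acc.dropWhile (· == ' ')).reverse ++
      (if laP isCloseB l then [] else (acc.takeWhile (· == ' ')).reverse) ++
      combined (openHead acc) l := by
  intro l
  induction l with
  | nil =>
    intro acc
    simp only [List.foldl_nil]
    rw [show laP isCloseB [] = false from rfl]
    conv_lhs => rw [← List.takeWhile_append_dropWhile (p := (· == ' ')) (l := acc)]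
    rw [List.reverse_append, show combined (openHead acc) [] = [] from rfl, List.append_nil,
      if_neg (show ¬(false = true) by simp)]
  | cons a t ih =>
    intro acc
    rw [List.foldl_cons]
    by_cases ha : a = ' '
    · subst ha
      have hla' : laP isCloseB (' ' :: t) = laP isCloseB t := by rw [laP_cons]; simp
      cases hoh : openHead acc with
      | true =>
        obtain ⟨h0, rest, rfl⟩ : ∃ h0 rest, acc = h0 :: rest := by
          cases acc with
          | nil => simp [openHead] at hoh
          | cons x xs => exact ⟨x, xs, rfl⟩
        have hop : isOpenB h0 = true := by simpa [openHead] using hoh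
        have h0ne : (h0 == ' ') = false := by
          rcases (by simpa [isOpenB] using hop : (h0 = '(' ∨ h0 = '[') ∨ h0 = '{') with (rfl | rfl) | rfl <;> rfl
        have hb : bstep (h0 :: rest) ' ' = h0 :: rest := by
          unfold bstep
          rw [if_pos (by rw [hoh]; simp)]
        have htw : (h0 :: rest).takeWhile (· == ' ') = [] :=
          List.takeWhile_cons_of_neg (by simp [h0ne])
        have hdw : (h0 :: rest).dropWhile (· == ' ') = h0 :: rest :=
          List.dropWhile_cons_of_neg (by simp [h0ne])
        have hcomb : combined true (' ' :: t) = combined true t := by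
          rw [combined, if_pos (by simp)]
        rw [hb, ih, hoh, hla', hcomb, htw, hdw]
      | false =>
        have hb : bstep acc ' ' = ' ' :: acc := by
          unfold bstep
          rw [if_neg (by rw [hoh]; simp), if_neg (by simp [isCloseB_space])]
        have hdw : List.dropWhile (· == ' ') (' ' :: acc) = List.dropWhile (· == ' ') acc :=
          List.dropWhile_cons_of_pos (by simp)
        have htw : List.takeWhile (· == ' ') (' ' :: acc) = ' ' :: List.takeWhile (· == ' ') acc :=
          List.takeWhile_cons_of_pos (by simp)
        have hoh2 : openHead (' ' :: acc) = false := by simp [openHead, isOpenB_space]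
        rw [hb, ih, hdw, htw, hoh2, hla', combined, isOpenB_space]
        cases hla : laP isCloseB t <;> simp
    · have ha' : (a == ' ') = false := by simpa using ha
      have hlaPa : laP isCloseB (a :: t) = isCloseB a := by rw [laP_cons, if_neg (by simp [ha'])]
      by_cases hcl : isCloseB a = true
      · have hb : bstep acc a = a :: acc.dropWhile (· == ' ') := by
          unfold bstep
          rw [if_neg (by simp [ha']), if_pos hcl]
        have hopa : isOpenB a = false := by
          rcases (by simpa [isCloseB] using hcl : (a = ')' ∨ a = ']') ∨ a = '}') with (rfl | rfl) | rfl <;> rfl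
        have h1 : (a :: acc.dropWhile (· == ' ')).dropWhile (· == ' ') = a :: acc.dropWhile (· == ' ') :=
          List.dropWhile_cons_of_neg (by simp [ha'])
        have h2 : (a :: acc.dropWhile (· == ' ')).takeWhile (· == ' ') = [] :=
          List.takeWhile_cons_of_neg (by simp [ha'])
        have h3 : openHead (a :: acc.dropWhile (· == ' ')) = false := by simp [openHead, hopa]
        have hcomb : combined (openHead acc) (a :: t) = a :: combined (isOpenB a) t := by
          rw [combined, if_neg (by simp [ha'])]
        rw [hb, ih, h1, h2, h3, hlaPa, hcl, hcomb, hopa, if_pos rfl]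
        cases laP isCloseB t <;> simp
      · have hcl' : isCloseB a = false := by simpa using hcl
        have hb : bstep acc a = a :: acc := by
          unfold bstep
          rw [if_neg (by simp [ha']), if_neg (by simp [hcl'])]
        have h1 : (a :: acc).dropWhile (· == ' ') = a :: acc :=
          List.dropWhile_cons_of_neg (by simp [ha'])
        have h2 : (a :: acc).takeWhile (· == ' ') = [] :=
          List.takeWhile_cons_of_neg (by simp [ha'])
        have h3 : openHead (a :: acc) = isOpenB a := by simp [openHead]
        have hcomb : combined (openHead acc) (a :: t) = a :: combined (isOpenB a) t := by
          rw [combined, if_neg (by simp [ha'])]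
        have hrev : acc.reverse
            = (List.dropWhile (· == ' ') acc).reverse ++ (List.takeWhile (· == ' ') acc).reverse := by
          conv_lhs => rw [← List.takeWhile_append_dropWhile (p := (· == ' ')) (l := acc)]
          rw [List.reverse_append]
        rw [hb, ih, h1, h2, h3, hlaPa, hcl', hcomb, if_neg (show ¬(false = true) by simp),
          List.reverse_cons, hrev]
        cases laP isCloseB t <;> simp

theorem openPred_eq : (fun a => ((a == '{') || ((a == '[') || (a == '(')))) = isOpenB := by
  funext a
  cases h1 : a == '(' <;> cases h2 : a == '[' <;> cases h3 : a == '{' <;>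
    simp [isOpenB, h1, h2, h3]

theorem closePred_eq : (fun a => (((a == '}') || (a == ']')) || (a == ')'))) = isCloseB := by
  funext a
  cases h1 : a == ')' <;> cases h2 : a == ']' <;> cases h3 : a == '}' <;>
    simp [isCloseB, h1, h2, h3]

theorem perLine_eq (s : String) : perLineA s = perLineB s := by
  unfold perLineA perLineB
  congr 1
  rw [loopOpen_eq (show ('(' : Char) ≠ ' ' by decide),
      loopOpen_eq (show ('[' : Char) ≠ ' ' by decide),
      loopOpen_eq (show ('{' : Char) ≠ ' ' by decide),
      loopClose_eq (show (')' : Char) ≠ ' ' by decide),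
      loopClose_eq (show (']' : Char) ≠ ' ' by decide),
      loopClose_eq (show ('}' : Char) ≠ ' ' by decide)]
  rw [goOpen_merge (p := (· == '[')) (q := (· == '(')) (by decide) (by decide)]
  rw [goOpen_merge (p := (· == '{')) (q := fun a => ((a == '[') || (a == '('))) (by decide) (by decide)]
  rw [goClose_merge (· == '}') (· == ']')]
  rw [goClose_merge (fun a => ((a == '}') || (a == ']'))) (· == ')')]
  rw [show ((false : Bool) || (false || false)) = false from rfl]
  rw [openPred_eq, closePred_eq, bridge]
  rw [foldB]
  simp [openHead]

-- ===== VERDICT (by name: the statement is the Claim_ definition above) =====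
theorem removeSpacesRightAndLeftFromBrackets_spec : Claim_equal_removeSpacesRightAndLeftFromBrackets := by
  intro lines _
  unfold Spec_removeSpacesRightAndLeftFromBrackets removeSpacesRightAndLeftFromBrackets
    removeSpacesRightAndLeftFromBrackets_alt
  exact List.map_congr_left (fun s _ => perLine_eq s)
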